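-- pv_equiv track=rewrite | github.com/crownstone/bluenet-lib-logs | bluenet_logs/ParsePreprocessedFile.py | _getFileNameHash
-- ===== SOURCE A (Python) =====
-- def _getFileNameHash(fileName: str):
--     byteArray = bytearray()
--     byteArray.extend(map(ord, fileName))
--
--     hashVal: int = 5381
--     # A string in C ends with 0.
--     hashVal = (hashVal * 33 + 0) & 0xFFFFFFFF
--     for c in reversed(byteArray):
--         if c == ord('/'):
--             return hashVal
--         hashVal = (hashVal * 33 + c) & 0xFFFFFFFF
--     return hashVal
-- ===== SOURCE B (Python) =====
-- def _getFileNameHash(fileName: str):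
--     # Forward single pass: accumulate the polynomial sum and the power of 33
--     # over the segment after the last '/', then combine once at the end.
--     tail = fileName.rsplit('/', 1)[-1]
--     acc = 0
--     p = 1
--     for ch in tail:
--         acc = (acc + ord(ch) * p) & 0xFFFFFFFF
--         p = (p * 33) & 0xFFFFFFFF
--     return (5381 * 33 * p + acc) & 0xFFFFFFFF
-- ===== Notes on version B (the rewrite author's own statement) =====
-- stated objective: alternative
-- what changed: B splits off the segment after the last slash with rsplit and hashes it in a single branchless forward pass that accumulates the polynomial sum and the running power of 33 (combined once at the end), instead of A's reversed-order Horner loop with an in-loop slash test and early return.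
import Mathlib
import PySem

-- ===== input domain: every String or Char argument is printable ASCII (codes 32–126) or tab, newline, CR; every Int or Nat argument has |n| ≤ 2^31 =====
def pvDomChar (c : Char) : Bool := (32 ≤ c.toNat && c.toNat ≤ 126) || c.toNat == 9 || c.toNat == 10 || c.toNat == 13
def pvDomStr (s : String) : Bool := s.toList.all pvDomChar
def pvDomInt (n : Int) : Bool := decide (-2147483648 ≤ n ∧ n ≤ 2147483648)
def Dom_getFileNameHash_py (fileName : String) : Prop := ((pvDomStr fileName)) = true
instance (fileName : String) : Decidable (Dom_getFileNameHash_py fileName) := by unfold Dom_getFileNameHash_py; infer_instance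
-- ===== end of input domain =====

-- B replaces A's reversed Horner loop with an early-return slash branch by a boundary
-- split (rsplit) plus a branchless forward pass accumulating the polynomial sum and
-- the power of 33, combined once at the end (objective: alternative).

-- ===== PORT A =====
-- A's loop over reversed(byteArray) with the early return on '/'.
def pvALoop : List Int → Int → Int
  | [], hashVal => hashVal
  | c :: rest, hashVal =>
    if c = 47 then hashVal
    else pvALoop rest ((hashVal * 33 + c) % 4294967296)

def getFileNameHash_py (fileName : String) : Int :=
  let byteArray : List Int := fileName.toList.map (fun c => (c.toNat : Int))
  let hashVal : Int := (5381 * 33 + 0) % 4294967296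
  pvALoop byteArray.reverse hashVal

-- ===== PORT B =====
-- B's forward loop over the tail: acc = (acc + ord(ch)*p) & mask; p = (p*33) & mask.
def pvBLoop : List Char → Int × Int → Int × Int
  | [], s => s
  | ch :: rest, (acc, p) =>
    pvBLoop rest ((acc + (ch.toNat : Int) * p) % 4294967296, (p * 33) % 4294967296)

def getFileNameHash_py_alt (fileName : String) : Int :=
  -- tail = fileName.rsplit('/', 1)[-1]
  let tail : List Char := (fileName.toList.reverse.takeWhile (fun c => c ≠ '/')).reverse
  let s := pvBLoop tail (0, 1)
  (5381 * 33 * s.2 + s.1) % 4294967296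

-- ===== PRECONDITION & SPEC =====
def Spec_getFileNameHash_py (fileName : String) (out : Int) : Prop := out = getFileNameHash_py_alt fileName
instance (fileName : String) (out : Int) : Decidable (Spec_getFileNameHash_py fileName out) := by unfold Spec_getFileNameHash_py; infer_instance

-- ===== CLAIM (what is proved, stated in full; the proofs are below) =====
def Claim_equal_getFileNameHash_py : Prop := ∀ (fileName : String), Dom_getFileNameHash_py fileName → Spec_getFileNameHash_py fileName (getFileNameHash_py fileName)

-- ===== LEMMAS AND PROOFS =====

-- A's hashing loop without the '/' branch.
def pvPureHash : List Int → Int → Int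
  | [], h => h
  | c :: rest, h => pvPureHash rest ((h * 33 + c) % 4294967296)

-- value of a code list under A's (reversed-iteration) Horner scheme
def pvVal : List Int → Int
  | [] => 0
  | c :: rest => c * 33 ^ rest.length + pvVal rest

-- value of the tail under B's forward scheme
def pvS : List Char → Int
  | [] => 0
  | c :: rest => (c.toNat : Int) + 33 * pvS rest

lemma pv_mm (a M : Int) : a % M % M = a % M := Int.emod_emod_of_dvd a dvd_rfl

lemma pv_absorb (a b c M : Int) : ((a % M) * b + c) % M = (a * b + c) % M := by
  conv_lhs => rw [Int.add_emod, Int.mul_emod, pv_mm, ← Int.mul_emod, ← Int.add_emod]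

lemma pvALoop_takeWhile (l : List Int) (h : Int) :
    pvALoop l h = pvPureHash (l.takeWhile (fun c => c ≠ 47)) h := by
  induction l generalizing h with
  | nil => rfl
  | cons c rest ih =>
    by_cases hc : c = 47
    · simp [pvALoop, List.takeWhile, hc, pvPureHash]
    · simp [pvALoop, List.takeWhile, hc, pvPureHash, ih]

lemma pvPureHash_closed (l : List Int) (h : Int) :
    pvPureHash l (h % 4294967296) = (h * 33 ^ l.length + pvVal l) % 4294967296 := by
  induction l generalizing h with
  | nil => simp [pvPureHash, pvVal]
  | cons c rest ih =>
    have : pvPureHash (c :: rest) (h % 4294967296)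
        = pvPureHash rest ((h * 33 + c) % 4294967296) := by
      simp only [pvPureHash, pv_absorb]
    rw [this, ih]
    congr 1
    simp [pvVal, List.length_cons, pow_succ]
    ring

lemma pvBLoop_closed (t : List Char) (acc p : Int) :
    pvBLoop t (acc % 4294967296, p % 4294967296)
      = ((acc + p * pvS t) % 4294967296, (p * 33 ^ t.length) % 4294967296) := by
  induction t generalizing acc p with
  | nil => simp [pvBLoop, pvS]
  | cons c rest ih =>
    have hm : ∀ a : Int, a % 4294967296 ≡ a [ZMOD (4294967296 : Int)] :=
      fun a => Int.emod_emod_of_dvd a dvd_rfl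
    simp only [pvBLoop]
    rw [ih]
    simp only [Prod.mk.injEq, pvS, List.length_cons]
    refine ⟨?_, ?_⟩
    · have h : acc % 4294967296 + (c.toNat : Int) * (p % 4294967296)
            + (p % 4294967296 * 33) * pvS rest
          ≡ acc + (c.toNat : Int) * p + (p * 33) * pvS rest [ZMOD (4294967296 : Int)] :=
        ((hm acc).add (((hm p).mul_left _))).add (((hm p).mul_right 33).mul_right (pvS rest))
      have e : acc + (c.toNat : Int) * p + (p * 33) * pvS rest
          = acc + p * ((c.toNat : Int) + 33 * pvS rest) := by ring
      exact e ▸ h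
    · have h : (p % 4294967296 * 33) * 33 ^ rest.length
          ≡ (p * 33) * 33 ^ rest.length [ZMOD (4294967296 : Int)] :=
        ((hm p).mul_right 33).mul_right (33 ^ rest.length)
      have e : (p * 33) * 33 ^ rest.length = p * 33 ^ (rest.length + 1) := by ring
      exact e ▸ h

lemma pvVal_append (l : List Int) (c : Int) : pvVal (l ++ [c]) = 33 * pvVal l + c := by
  induction l with
  | nil => simp [pvVal]
  | cons x rest ih =>
    simp [pvVal, ih, List.length_append, pow_succ]
    ring

lemma pvVal_reverse_map (t : List Char) :
    pvVal ((t.map (fun c => (c.toNat : Int))).reverse) = pvS t := by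
  induction t with
  | nil => rfl
  | cons c rest ih =>
    simp only [List.map_cons, List.reverse_cons, pvVal_append, ih, pvS]
    ring

lemma pv_code_pred (c : Char) :
    (decide (¬ (c.toNat : Int) = 47)) = (decide (¬ c = '/')) := by
  rcases c with ⟨v, hv⟩
  simp only [decide_eq_decide, Char.toNat, not_iff_not]
  constructor
  · intro h
    have hvn : v.toNat = 47 := by exact_mod_cast h
    have : v = 47 := by
      apply UInt32.toNat_inj.mp
      simpa using hvn
    subst this; rfl
  · intro h
    have : v = 47 := by
      have := congrArg Char.val h
      simpa using this
    subst this; rfl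

lemma pv_takeWhile_map (l : List Char) :
    (l.map (fun c => (c.toNat : Int))).takeWhile (fun c => c ≠ 47)
      = (l.takeWhile (fun c => c ≠ '/')).map (fun c => (c.toNat : Int)) := by
  rw [List.takeWhile_map]
  have hf : ((fun c : Int => decide (¬ c = 47)) ∘ fun c : Char => ((c.toNat : Int)))
      = (fun c : Char => decide (¬ c = '/')) := by
    funext c
    simp only [Function.comp]
    exact pv_code_pred c
  simp only [ne_eq]
  rw [hf]

-- ===== VERDICT (by name: the statement is the Claim_ definition above) =====
theorem getFileNameHash_py_spec : Claim_equal_getFileNameHash_py := by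
  intro fileName _
  unfold Spec_getFileNameHash_py getFileNameHash_py getFileNameHash_py_alt
  simp only []
  set chars := fileName.toList with hchars
  set tail : List Char := (chars.reverse.takeWhile (fun c => c ≠ '/')).reverse with htail
  have hrev : (chars.map (fun c => (c.toNat : Int))).reverse.takeWhile (fun c => c ≠ 47)
      = (tail.map (fun c => (c.toNat : Int))).reverse := by
    rw [← List.map_reverse, pv_takeWhile_map, htail, List.map_reverse, List.reverse_reverse]
  rw [pvALoop_takeWhile, hrev]
  have h1 : ((5381 * 33 + 0 : Int) % 4294967296) = ((177573 : Int) % 4294967296) := by norm_num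
  rw [h1, pvPureHash_closed, pvVal_reverse_map]
  have h0 : ((0 : Int), (1 : Int)) = ((0 : Int) % 4294967296, (1 : Int) % 4294967296) := by
    norm_num
  rw [h0, pvBLoop_closed]
  have hlen : (tail.map (fun c => (c.toNat : Int))).reverse.length = tail.length := by
    simp
  rw [hlen]
  rw [Int.add_emod (5381 * 33 * ((1 : Int) * 33 ^ tail.length % 4294967296)),
    Int.mul_emod (5381 * 33 : Int), pv_mm, ← Int.mul_emod, pv_mm, ← Int.add_emod]
  congr 1
  ring
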